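-- pv_equiv track=rewrite | github.com/volcengine/verl | atropos/environments/intern_bootcamp/internbootcamp_lib/internbootcamp/bootcamp/csuperiorperiodicsubarrays/csuperiorperiodicsubarrays.py | _solve
-- ===== SOURCE A (Python) =====
-- from typing import Dict, List, Optional
--
-- def _solve(n: int, a: List[int]) -> int:
--     """优化后的暴力解法"""
--     ans = 0
--     for s in range(1, n):
--         for l in range(n):
--             valid = True
--             for i in range(n):
--                 original_pos = (l + i) % n
--                 subarray_pos = (l + (i % s)) % n
--                 if a[subarray_pos] < a[original_pos]:
--                     valid = False
--                     break
--             if valid: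
--                 ans += 1
--     return ans
-- ===== SOURCE B (Python) =====
-- from typing import Dict, List, Optional
--
-- def _solve(n: int, a: List[int]) -> int:
--     # Per period s: precompute step-s "dominates the next K (resp. K-1) elements"
--     # flags, then count valid offsets with prefix sums over the doubled flag arrays.
--     ans = 0
--     for s in range(1, n):
--         K = (n - 1) // s
--         t = (n - 1) % s
--         # g1[p] = 1 iff a[p] >= a[(p + m*s) % n] for every m in 1..K-1
--         g1 = [1 if all(a[p] >= a[(p + m * s) % n] for m in range(1, K)) else 0
--               for p in range(n)]
--         # g2[p] = 1 iff the same holds for every m in 1..K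
--         g2 = [1 if g1[p] == 1 and a[p] >= a[(p + K * s) % n] else 0
--               for p in range(n)]
--         # prefix sums of the flags over the doubled (circular) arrays
--         P1 = [0]
--         P2 = [0]
--         for j in range(2 * n):
--             P1.append(P1[-1] + g1[j % n])
--             P2.append(P2[-1] + g2[j % n])
--         # offset l is valid iff g2 holds on the circular window [l, l+t]
--         # and g1 holds on the circular window [l+t+1, l+s-1]
--         for l in range(n):
--             if P2[l + t + 1] - P2[l] == t + 1 and P1[l + s] - P1[l + t + 1] == s - 1 - t:
--                 ans += 1
--     return ans
-- ===== Notes on version B (the rewrite author's own statement) =====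
-- stated objective: alternative
-- what changed: Instead of re-testing all n comparisons for every (period s, offset l) pair, B groups the comparisons by residue class: per s it precomputes, for each position, whether it dominates its next K (resp. K-1) successors in steps of s, and then decides each offset in O(1) via prefix sums of these 0/1 flags over the doubled circular arrays (intended as faster, measured ~10x at mid sizes, unconfirmed at the largest probe size, so no speed label is claimed).
import Mathlib
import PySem

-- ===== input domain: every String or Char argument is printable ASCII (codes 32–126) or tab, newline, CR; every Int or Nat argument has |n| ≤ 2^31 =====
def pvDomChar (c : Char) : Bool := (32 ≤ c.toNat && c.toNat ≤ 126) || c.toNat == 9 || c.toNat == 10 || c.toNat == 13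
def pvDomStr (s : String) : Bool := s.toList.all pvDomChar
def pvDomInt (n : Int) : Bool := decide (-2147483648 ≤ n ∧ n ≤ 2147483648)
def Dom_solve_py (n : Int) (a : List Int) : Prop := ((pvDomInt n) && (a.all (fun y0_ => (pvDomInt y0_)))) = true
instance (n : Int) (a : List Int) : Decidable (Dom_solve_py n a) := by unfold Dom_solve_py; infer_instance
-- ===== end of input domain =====

-- B restructures A's triple re-check loop: per period s it precomputes step-s
-- dominance flags once and counts valid offsets via prefix-sum windows over the
-- doubled flag arrays (intended as faster; a timing run measured ~10x at
-- mid sizes but could not confirm the label at its largest size, so none is claimed).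

-- ===== PORT A =====
def solve_py (n : Int) (a : List Int) : Int :=
  (PySem.List.pyRange 1 n 1).foldl (fun ans s =>
    (PySem.List.pyRange 0 n 1).foldl (fun ans l =>
      let valid : Bool := (PySem.List.pyRange 0 n 1).foldl (fun valid i =>
        valid && !(PySem.List.pyGetD a (PySem.Int.mod (l + PySem.Int.mod i s) n) 0 <
                   PySem.List.pyGetD a (PySem.Int.mod (l + i) n) 0)) true
      if valid then ans + 1 else ans) ans) 0

-- ===== PORT B =====
def solve_py_alt (n : Int) (a : List Int) : Int :=
  (PySem.List.pyRange 1 n 1).foldl (fun ans s =>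
    let K := PySem.Int.floordiv (n - 1) s
    let t := PySem.Int.mod (n - 1) s
    let g1 : List Int := (PySem.List.pyRange 0 n 1).map (fun p =>
      if (PySem.List.pyRange 1 K 1).all (fun m =>
           PySem.List.pyGetD a p 0 ≥ PySem.List.pyGetD a (PySem.Int.mod (p + m * s) n) 0)
      then 1 else 0)
    let g2 : List Int := (PySem.List.pyRange 0 n 1).map (fun p =>
      if PySem.List.pyGetD g1 p 0 = 1 ∧
         PySem.List.pyGetD a p 0 ≥ PySem.List.pyGetD a (PySem.Int.mod (p + K * s) n) 0
      then 1 else 0)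
    let P1 : List Int := (PySem.List.pyRange 0 (2 * n) 1).foldl
      (fun P j => P ++ [PySem.List.pyGetD P (-1) 0 + PySem.List.pyGetD g1 (PySem.Int.mod j n) 0]) [0]
    let P2 : List Int := (PySem.List.pyRange 0 (2 * n) 1).foldl
      (fun P j => P ++ [PySem.List.pyGetD P (-1) 0 + PySem.List.pyGetD g2 (PySem.Int.mod j n) 0]) [0]
    (PySem.List.pyRange 0 n 1).foldl (fun ans l =>
      if PySem.List.pyGetD P2 (l + t + 1) 0 - PySem.List.pyGetD P2 l 0 = t + 1 ∧
         PySem.List.pyGetD P1 (l + s) 0 - PySem.List.pyGetD P1 (l + t + 1) 0 = s - 1 - t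
      then ans + 1 else ans) ans) 0

-- ===== PRECONDITION & SPEC =====
-- Pre_ excludes only inputs where the Python A raises IndexError: n ≥ 2 with fewer
-- than n list elements (both programs index a[p] for every p in [0, n) then).
def Pre_solve_py (n : Int) (a : List Int) : Prop := n ≤ 1 ∨ n ≤ (a.length : Int)
instance (n : Int) (a : List Int) : Decidable (Pre_solve_py n a) := by unfold Pre_solve_py; infer_instance
def pvWitness_solve_py : Int × List Int := (4, [2, 1, 3, 1])
def Spec_solve_py (n : Int) (a : List Int) (out : Int) : Prop := out = solve_py_alt n a
instance (n : Int) (a : List Int) (out : Int) : Decidable (Spec_solve_py n a out) := by unfold Spec_solve_py; infer_instance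

-- ===== CLAIM (what is proved, stated in full; the proofs are below) =====
def Claim_equal_solve_py : Prop := ∀ (n : Int) (a : List Int), Dom_solve_py n a → Pre_solve_py n a → Spec_solve_py n a (solve_py n a)

-- ===== LEMMAS AND PROOFS =====

-- a[x % n] with default 0: the only way either port reads the array
def pvAidx (n : Int) (a : List Int) (x : Int) : Int := PySem.List.pyGetD a (x % n) 0

-- "a[x] dominates its next c successors in steps of s (circularly)"
def pvG (n : Int) (a : List Int) (s c x : Int) : Prop :=
  ∀ m : Int, 1 ≤ m → m ≤ c → pvAidx n a x ≥ pvAidx n a (x + m * s)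

-- prefix sum of F over [0, c)
def pvPS (F : Int → Int) (c : Int) : Int := ((PySem.List.pyRange 0 c 1).map F).sum

theorem pv_foldl_and (f : Int → Bool) (xs : List Int) (b : Bool) :
    xs.foldl (fun v i => v && f i) b = (b && xs.all f) := by
  induction xs generalizing b with
  | nil => simp
  | cons x xs ih => simp [List.foldl_cons, ih, Bool.and_assoc]

theorem pv_aidx_mod (n : Int) (a : List Int) (j y : Int) :
    pvAidx n a (j % n + y) = pvAidx n a (j + y) := by
  unfold pvAidx
  rw [Int.emod_add_emod]

theorem pv_aidx_mod0 (n : Int) (a : List Int) (j : Int) :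
    pvAidx n a (j % n) = pvAidx n a j := by
  unfold pvAidx
  rw [Int.emod_emod_of_dvd _ (dvd_refl n)]

theorem pvG_mod (n : Int) (a : List Int) (s c j : Int) :
    pvG n a s c (j % n) ↔ pvG n a s c j := by
  unfold pvG
  simp only [pv_aidx_mod, pv_aidx_mod0]

-- the central regrouping: A's inner break-loop over i < n equals the two
-- window conditions with cutoffs K and K-1
theorem pv_validA_iff (n : Int) (a : List Int) (s l : Int) (hs1 : 1 ≤ s) (hsn : s < n) :
    (((PySem.List.pyRange 0 n 1).foldl (fun valid i =>
        valid && !(PySem.List.pyGetD a ((l + i % s) % n) 0 <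
                   PySem.List.pyGetD a ((l + i) % n) 0)) true) = true)
    ↔ ((∀ r : Int, 0 ≤ r → r ≤ (n-1) % s → pvG n a s ((n-1)/s) (l + r)) ∧
       (∀ r : Int, (n-1) % s < r → r < s → pvG n a s ((n-1)/s - 1) (l + r))) := by
  have hs : (0:Int) < s := by omega
  have hn : (0:Int) < n := by omega
  rw [pv_foldl_and, Bool.true_and, List.all_eq_true]
  have hconv : (∀ i ∈ PySem.List.pyRange 0 n 1,
      (!(PySem.List.pyGetD a ((l + i % s) % n) 0 <
         PySem.List.pyGetD a ((l + i) % n) 0)) = true)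
      ↔ (∀ i : Int, 0 ≤ i → i < n → pvAidx n a (l + i % s) ≥ pvAidx n a (l + i)) := by
    unfold pvAidx
    simp only [PySem.List.mem_pyRange_one, Bool.not_eq_eq_eq_not, Bool.not_true,
      decide_eq_false_iff_not, not_lt, ge_iff_le, and_imp]
  rw [hconv]
  have hKt : s * ((n-1)/s) + (n-1) % s = n - 1 := Int.mul_ediv_add_emod (n-1) s
  have ht0 : 0 ≤ (n-1) % s := Int.emod_nonneg _ (by omega)
  have hts : (n-1) % s < s := Int.emod_lt_of_pos _ hs
  constructor
  · intro H
    constructor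
    · intro r hr0 hrt m hm1 hmK
      have hms0 : 0 < m * s := mul_pos (by omega) hs
      have hub : m * s ≤ ((n-1)/s) * s := mul_le_mul_of_nonneg_right hmK (le_of_lt hs)
      have hcomm : ((n-1)/s) * s = s * ((n-1)/s) := mul_comm _ _
      have hi : r + m * s < n := by linarith
      have hH := H (r + m * s) (by linarith) hi
      rw [Int.add_mul_emod_self_right, Int.emod_eq_of_lt hr0 (by omega)] at hH
      rw [show l + r + m * s = l + (r + m * s) by ring]
      exact hH
    · intro r hrt hrs m hm1 hmK
      have hms0 : 0 < m * s := mul_pos (by omega) hs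
      have hub : m * s ≤ ((n-1)/s - 1) * s := mul_le_mul_of_nonneg_right hmK (le_of_lt hs)
      have hcomm : ((n-1)/s - 1) * s = s * ((n-1)/s) - s := by ring
      have hi : r + m * s < n := by linarith
      have hH := H (r + m * s) (by linarith) hi
      rw [Int.add_mul_emod_self_right, Int.emod_eq_of_lt (by omega) hrs] at hH
      rw [show l + r + m * s = l + (r + m * s) by ring]
      exact hH
  · rintro ⟨H1, H2⟩ i hi0 hin
    have hr0 : 0 ≤ i % s := Int.emod_nonneg _ (by omega)
    have hrs : i % s < s := Int.emod_lt_of_pos _ hs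
    have hm0 : 0 ≤ i / s := Int.ediv_nonneg hi0 (le_of_lt hs)
    have hieq : s * (i / s) + i % s = i := Int.mul_ediv_add_emod i s
    by_cases hm : i / s = 0
    · have : i % s = i := by rw [hm] at hieq; omega
      rw [this]
    · have hm1 : (1:Int) ≤ i / s := by omega
      have hcm : (i / s) * s = s * (i / s) := mul_comm _ _
      by_cases hreg : i % s ≤ (n-1) % s
      · have hub : i / s ≤ (n-1)/s := by
          by_contra hc
          push Not at hc
          have h2 : ((n-1)/s + 1) * s ≤ (i / s) * s :=
            mul_le_mul_of_nonneg_right (by omega) (le_of_lt hs)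
          have h3 : ((n-1)/s + 1) * s = s * ((n-1)/s) + s := by ring
          linarith
        have hH := H1 (i % s) hr0 hreg (i / s) hm1 hub
        rw [show l + i % s + (i / s) * s = l + i by linarith] at hH
        exact hH
      · push Not at hreg
        have hub : i / s ≤ (n-1)/s - 1 := by
          by_contra hc
          push Not at hc
          have h2 : ((n-1)/s) * s ≤ (i / s) * s :=
            mul_le_mul_of_nonneg_right (by omega) (le_of_lt hs)
          have h3 : ((n-1)/s) * s = s * ((n-1)/s) := by ring
          linarith
        have hH := H2 (i % s) hreg hrs (i / s) hm1 hub
        rw [show l + i % s + (i / s) * s = l + i by linarith] at hH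
        exact hH

theorem pv_ps_succ (F : Int → Int) (y : Int) (hy : 0 ≤ y) :
    pvPS F (y + 1) = pvPS F y + F y := by
  unfold pvPS
  rw [PySem.List.pyRange_one_succ_right hy]
  simp

-- the prefix-sum list equals the map of pvPS over 0..c
theorem pv_buildP (F : Int → Int) (c : Nat) :
    (PySem.List.pyRange 0 (c : Int) 1).foldl
        (fun P j => P ++ [PySem.List.pyGetD P (-1) 0 + F j]) [0]
      = (PySem.List.pyRange 0 ((c : Int) + 1) 1).map (pvPS F) := by
  induction c with
  | zero =>
    rw [show ((0:Nat):Int) = 0 from rfl, PySem.List.pyRange_one_eq_nil (le_refl (0 : Int)),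
        show (0:Int) + 1 = 0 + 1 from rfl, PySem.List.pyRange_one_singleton]
    simp [pvPS, PySem.List.pyRange_one_eq_nil (le_refl (0 : Int))]
  | succ c ih =>
    push_cast
    rw [PySem.List.pyRange_one_succ_right (by positivity : (0:Int) ≤ (c:Int)),
        List.foldl_append]
    push_cast at ih
    rw [ih]
    rw [show ((c:Int) + 1 + 1) = ((c:Int) + 1) + 1 by ring]
    rw [PySem.List.pyRange_one_succ_right (by positivity : (0:Int) ≤ (c:Int) + 1),
        PySem.List.pyRange_one_succ_right (by positivity : (0:Int) ≤ (c:Int)),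
        List.map_append, List.map_append]
    simp only [List.foldl_cons, List.foldl_nil, List.map_cons, List.map_nil,
      PySem.List.pyGetD_neg_one_append_singleton]
    rw [pv_ps_succ F _ (by positivity)]
    simp [List.map_append]

theorem pv_ps_split (F : Int → Int) (x y : Int) (h0 : 0 ≤ x) (hxy : x ≤ y) :
    pvPS F y = pvPS F x + ((PySem.List.pyRange x y 1).map F).sum := by
  unfold pvPS
  rw [PySem.List.pyRange_one_append 0 x y h0 hxy, List.map_append, List.sum_append]

theorem pv_sum_flags (F : Int → Int) (h01 : ∀ j, F j = 0 ∨ F j = 1) (x y : Int) (hxy : x ≤ y) :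
    ((PySem.List.pyRange x y 1).map F).sum ≤ y - x ∧
    (((PySem.List.pyRange x y 1).map F).sum = y - x ↔ ∀ j, x ≤ j → j < y → F j = 1) := by
  obtain ⟨k, hk⟩ : ∃ k : Nat, y = x + k := ⟨(y - x).toNat, by omega⟩
  subst hk
  clear hxy
  induction k with
  | zero =>
    rw [show x + ((0:Nat):Int) = x by push_cast; ring,
        PySem.List.pyRange_one_eq_nil (le_refl x)]
    refine ⟨by simp, by simp; intro j h1 h2; omega⟩
  | succ k ih =>
    rw [show x + ((k+1:Nat):Int) = (x + (k:Nat)) + 1 by push_cast; ring,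
        PySem.List.pyRange_one_succ_right (by omega : x ≤ x + ((k:Nat):Int)),
        List.map_append, List.sum_append]
    simp only [List.map_cons, List.map_nil, List.sum_cons, List.sum_nil]
    obtain ⟨ih1, ih2⟩ := ih
    have h1 := h01 (x + (k:Nat))
    constructor
    · omega
    constructor
    · intro h
      have hS : ((PySem.List.pyRange x (x + ((k:Nat):Int)) 1).map F).sum = x + (k:Nat) - x := by omega
      have hF : F (x + (k:Nat)) = 1 := by omega
      intro j hj1 hj2
      by_cases hj : j = x + (k:Nat)
      · rw [hj]; exact hF
      · exact ih2.mp hS j hj1 (by omega)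
    · intro h
      have hS := ih2.mpr (fun j hj1 hj2 => h j hj1 (by omega))
      have hF := h (x + (k:Nat)) (by omega) (by omega)
      omega

theorem pv_ite_eq_one (c : Prop) [Decidable c] : ((if c then (1:Int) else 0) = 1) ↔ c := by
  split_ifs with h <;> simp [h]

theorem pv_buildP' (F : Int → Int) (c : Int) (hc : 0 ≤ c) :
    (PySem.List.pyRange 0 c 1).foldl
        (fun P j => P ++ [PySem.List.pyGetD P (-1) 0 + F j]) [0]
      = (PySem.List.pyRange 0 (c + 1) 1).map (pvPS F) := by
  obtain ⟨k, rfl⟩ : ∃ k : Nat, c = (k : Int) := ⟨c.toNat, by omega⟩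
  exact pv_buildP F k

-- value of the g1 flag list at index j % n
theorem pv_g1_iff (n : Int) (a : List Int) (s K : Int) (hn : 0 < n) (j : Int) :
    PySem.List.pyGetD ((PySem.List.pyRange 0 n 1).map (fun p =>
      if (PySem.List.pyRange 1 K 1).all (fun m =>
           PySem.List.pyGetD a p 0 ≥ PySem.List.pyGetD a ((p + m * s) % n) 0)
      then (1:Int) else 0)) (j % n) 0 = 1
    ↔ pvG n a s (K - 1) (j % n) := by
  rw [PySem.List.pyGetD_map_pyRange_of_nonneg _ n _ 0
      (Int.emod_nonneg _ (by omega)) (Int.emod_lt_of_pos _ hn)]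
  rw [pv_ite_eq_one, List.all_eq_true]
  unfold pvG pvAidx
  rw [Int.emod_emod_of_dvd _ (dvd_refl n)]
  constructor
  · intro h m h1 h2
    have := h m (by rw [PySem.List.mem_pyRange_one]; omega)
    simpa using this
  · intro h m hm
    rw [PySem.List.mem_pyRange_one] at hm
    simpa using h m (by omega) (by omega)

theorem pv_g1_01 (n : Int) (a : List Int) (s K : Int) (hn : 0 < n) (j : Int) :
    PySem.List.pyGetD ((PySem.List.pyRange 0 n 1).map (fun p =>
      if (PySem.List.pyRange 1 K 1).all (fun m =>
           PySem.List.pyGetD a p 0 ≥ PySem.List.pyGetD a ((p + m * s) % n) 0)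
      then (1:Int) else 0)) (j % n) 0 = 0 ∨
    PySem.List.pyGetD ((PySem.List.pyRange 0 n 1).map (fun p =>
      if (PySem.List.pyRange 1 K 1).all (fun m =>
           PySem.List.pyGetD a p 0 ≥ PySem.List.pyGetD a ((p + m * s) % n) 0)
      then (1:Int) else 0)) (j % n) 0 = 1 := by
  rw [PySem.List.pyGetD_map_pyRange_of_nonneg _ n _ 0
      (Int.emod_nonneg _ (by omega)) (Int.emod_lt_of_pos _ hn)]
  split_ifs <;> simp

-- value of the g2 flag list at index j % n
theorem pv_g2_iff (n : Int) (a : List Int) (s K : Int) (hn : 0 < n) (hK : 1 ≤ K) (j : Int) :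
    PySem.List.pyGetD ((PySem.List.pyRange 0 n 1).map (fun p =>
      if PySem.List.pyGetD ((PySem.List.pyRange 0 n 1).map (fun p =>
            if (PySem.List.pyRange 1 K 1).all (fun m =>
                 PySem.List.pyGetD a p 0 ≥ PySem.List.pyGetD a ((p + m * s) % n) 0)
            then (1:Int) else 0)) p 0 = 1 ∧
         PySem.List.pyGetD a p 0 ≥ PySem.List.pyGetD a ((p + K * s) % n) 0
      then (1:Int) else 0)) (j % n) 0 = 1
    ↔ pvG n a s K (j % n) := by
  rw [PySem.List.pyGetD_map_pyRange_of_nonneg _ n _ 0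
      (Int.emod_nonneg _ (by omega)) (Int.emod_lt_of_pos _ hn)]
  rw [pv_ite_eq_one]
  have hp : (j % n) % n = j % n := Int.emod_emod_of_dvd _ (dvd_refl n)
  rw [show (PySem.List.pyGetD ((PySem.List.pyRange 0 n 1).map (fun p =>
            if (PySem.List.pyRange 1 K 1).all (fun m =>
                 PySem.List.pyGetD a p 0 ≥ PySem.List.pyGetD a ((p + m * s) % n) 0)
            then (1:Int) else 0)) (j % n) 0 = 1) ↔ pvG n a s (K - 1) ((j % n) % n) from by
        rw [hp]; exact (hp ▸ pv_g1_iff n a s K hn (j % n) : _)]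
  rw [hp]
  unfold pvG pvAidx
  rw [hp]
  constructor
  · rintro ⟨h1, h2⟩ m hm1 hmK
    by_cases hc : m ≤ K - 1
    · exact h1 m hm1 hc
    · have : m = K := by omega
      subst this
      exact h2
  · intro h
    exact ⟨fun m h1 h2 => h m h1 (by omega), h K hK (le_refl K)⟩

theorem pv_g2_01 (n : Int) (a : List Int) (s K : Int) (hn : 0 < n) (_hK : 1 ≤ K) (j : Int) :
    PySem.List.pyGetD ((PySem.List.pyRange 0 n 1).map (fun p =>
      if PySem.List.pyGetD ((PySem.List.pyRange 0 n 1).map (fun p =>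
            if (PySem.List.pyRange 1 K 1).all (fun m =>
                 PySem.List.pyGetD a p 0 ≥ PySem.List.pyGetD a ((p + m * s) % n) 0)
            then (1:Int) else 0)) p 0 = 1 ∧
         PySem.List.pyGetD a p 0 ≥ PySem.List.pyGetD a ((p + K * s) % n) 0
      then (1:Int) else 0)) (j % n) 0 = 0 ∨
    PySem.List.pyGetD ((PySem.List.pyRange 0 n 1).map (fun p =>
      if PySem.List.pyGetD ((PySem.List.pyRange 0 n 1).map (fun p =>
            if (PySem.List.pyRange 1 K 1).all (fun m =>
                 PySem.List.pyGetD a p 0 ≥ PySem.List.pyGetD a ((p + m * s) % n) 0)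
            then (1:Int) else 0)) p 0 = 1 ∧
         PySem.List.pyGetD a p 0 ≥ PySem.List.pyGetD a ((p + K * s) % n) 0
      then (1:Int) else 0)) (j % n) 0 = 1 := by
  rw [PySem.List.pyGetD_map_pyRange_of_nonneg _ n _ 0
      (Int.emod_nonneg _ (by omega)) (Int.emod_lt_of_pos _ hn)]
  split_ifs <;> simp

-- a prefix-sum window of 0/1 flags is full iff every flag in it is 1
theorem pv_window_iff (F : Int → Int) (h01 : ∀ j, F j = 0 ∨ F j = 1)
    (x y : Int) (h0 : 0 ≤ x) (hxy : x ≤ y) :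
    (pvPS F y - pvPS F x = y - x) ↔ ∀ j, x ≤ j → j < y → F j = 1 := by
  rw [pv_ps_split F x y h0 hxy]
  have h := pv_sum_flags F h01 x y hxy
  constructor
  · intro hh
    exact h.2.mp (by omega)
  · intro hh
    have := h.2.mpr hh
    omega

-- ===== VERDICT (by name: the statement is the Claim_ definition above) =====
theorem solve_py_spec : Claim_equal_solve_py := by
  intro n a _hdom _hpre
  unfold Spec_solve_py solve_py solve_py_alt
  apply PySem.List.foldl_congr_mem
  intro ans s hs
  rw [PySem.List.mem_pyRange_one] at hs
  obtain ⟨hs1, hsn⟩ := hs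
  have hspos : (0:Int) < s := by omega
  have hn : (0:Int) < n := by omega
  have hK1 : 1 ≤ (n-1)/s := (Int.le_ediv_iff_mul_le hspos).mpr (by omega)
  dsimp only
  simp only [PySem.Int.floordiv_eq_ediv_of_pos hspos, PySem.Int.mod_eq_emod_of_pos hspos,
    PySem.Int.mod_eq_emod_of_pos hn]
  rw [pv_buildP' _ (2*n) (by omega), pv_buildP' _ (2*n) (by omega)]
  apply PySem.List.foldl_congr_mem
  intro ans l hl
  rw [PySem.List.mem_pyRange_one] at hl
  obtain ⟨hl0, hln⟩ := hl
  refine if_congr ?_ rfl rfl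
  rw [pv_validA_iff n a s l hs1 hsn]
  have ht0 : 0 ≤ (n-1) % s := Int.emod_nonneg _ (by omega)
  have hts : (n-1) % s < s := Int.emod_lt_of_pos _ hspos
  rw [PySem.List.pyGetD_map_pyRange_of_nonneg _ (2*n+1) (l + (n-1) % s + 1) 0 (by omega) (by omega),
      PySem.List.pyGetD_map_pyRange_of_nonneg _ (2*n+1) l 0 (by omega) (by omega),
      PySem.List.pyGetD_map_pyRange_of_nonneg _ (2*n+1) (l + s) 0 (by omega) (by omega),
      PySem.List.pyGetD_map_pyRange_of_nonneg _ (2*n+1) (l + (n-1) % s + 1) 0 (by omega) (by omega)]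
  refine and_congr ?_ ?_
  · rw [show (n-1) % s + 1 = (l + (n-1) % s + 1) - l by ring]
    rw [pv_window_iff _ (fun j => pv_g2_01 n a s _ hn hK1 j) l (l + (n-1) % s + 1) hl0 (by omega)]
    constructor
    · intro h j hj1 hj2
      rw [pv_g2_iff n a s _ hn hK1 j, pvG_mod]
      have := h (j - l) (by omega) (by omega)
      rw [show l + (j - l) = j by ring] at this
      exact this
    · intro h r hr0 hrt
      have := h (l + r) (by omega) (by omega)
      rw [pv_g2_iff n a s _ hn hK1 (l + r), pvG_mod] at this
      exact this
  · rw [show s - 1 - (n-1) % s = (l + s) - (l + (n-1) % s + 1) by ring]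
    rw [pv_window_iff _ (fun j => pv_g1_01 n a s _ hn j) (l + (n-1) % s + 1) (l + s) (by omega) (by omega)]
    constructor
    · intro h j hj1 hj2
      rw [pv_g1_iff n a s _ hn j, pvG_mod]
      have := h (j - l) (by omega) (by omega)
      rw [show l + (j - l) = j by ring] at this
      exact this
    · intro h r hr1 hr2
      have := h (l + r) (by omega) (by omega)
      rw [pv_g1_iff n a s _ hn (l + r), pvG_mod] at this
      exact this
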